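-- pv_equiv track=rewrite | github.com/Owen-Reich-Likes-Math/wss_primes_isef | scripts/computational_scripts/prime_valuation_classification_scan.py | lucas_u_mod
-- ===== SOURCE A (Python) =====
-- def lucas_u_mod(P: int, Q: int, n: int, mod: int) -> int:
--     """
--     Return U_n(P,Q) mod `mod` where U_0=0, U_1=1, U_n = P U_{n-1} - Q U_{n-2}.
--     Uses M = [[P, -Q],[1,0]] and U_n = (M^(n-1))[0,0] for n>=1.
--     """
--     if n == 0:
--         return 0 % mod
--     if n == 1:
--         return 1 % mod
--
--     # initialize M = (a b; c d) = (P, -Q; 1, 0) mod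
--     a = P % mod
--     b = (-Q) % mod
--     c = 1 % mod
--     d = 0
--
--     # result = identity matrix
--     r00, r01, r10, r11 = 1, 0, 0, 1
--
--     e = n - 1
--     while e:
--         if e & 1:
--             # multiply r = r * M
--             t00 = (r00 * a + r01 * c) % mod
--             t01 = (r00 * b + r01 * d) % mod
--             t10 = (r10 * a + r11 * c) % mod
--             t11 = (r10 * b + r11 * d) % mod
--             r00, r01, r10, r11 = t00, t01, t10, t11
--         # M = M * M
--         t00 = (a * a + b * c) % mod
--         t01 = (a * b + b * d) % mod
--         t10 = (c * a + d * c) % mod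
--         t11 = (c * b + d * d) % mod
--         a, b, c, d = t00, t01, t10, t11
--         e >>= 1
--
--     return r00 % mod
-- ===== SOURCE B (Python) =====
-- def lucas_u_mod(P: int, Q: int, n: int, mod: int) -> int:
--     """
--     Return U_n(P,Q) mod `mod` (U_0=0, U_1=1, U_k = P U_{k-1} - Q U_{k-2})
--     by fast doubling on the pair (U_k, U_{k+1}), no matrices, no inverses.
--     """
--     def fd(k):
--         # returns (U_k % mod, U_{k+1} % mod)
--         if k == 0:
--             return (0 % mod, 1 % mod)
--         u, v = fd(k >> 1)
--         u2 = u * (2 * v - P * u) % mod          # U_{2j}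
--         u2p1 = (v * v - Q * u * u) % mod        # U_{2j+1}
--         if k & 1:
--             return (u2p1, (P * u2p1 - Q * u2) % mod)
--         return (u2, u2p1)
--     return fd(n)[0]
-- ===== Notes on version B (the rewrite author's own statement) =====
-- stated objective: alternative
-- what changed: Replaced 2x2 matrix binary exponentiation (12 modular multiplications per bit of n) by Lucas fast doubling on the pair (U_k, U_{k+1}) (4-6 multiplications per bit), recursing on n//2 instead of iterating over bits with an accumulator matrix.
-- outside the precondition, e.g. on lucas_u_mod(1, -1, 5, 0): A raises ZeroDivisionError, B raises ZeroDivisionError; on lucas_u_mod(1, -1, -2, 7): A does not finish within the time limit, B raises RecursionError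
import Mathlib
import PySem

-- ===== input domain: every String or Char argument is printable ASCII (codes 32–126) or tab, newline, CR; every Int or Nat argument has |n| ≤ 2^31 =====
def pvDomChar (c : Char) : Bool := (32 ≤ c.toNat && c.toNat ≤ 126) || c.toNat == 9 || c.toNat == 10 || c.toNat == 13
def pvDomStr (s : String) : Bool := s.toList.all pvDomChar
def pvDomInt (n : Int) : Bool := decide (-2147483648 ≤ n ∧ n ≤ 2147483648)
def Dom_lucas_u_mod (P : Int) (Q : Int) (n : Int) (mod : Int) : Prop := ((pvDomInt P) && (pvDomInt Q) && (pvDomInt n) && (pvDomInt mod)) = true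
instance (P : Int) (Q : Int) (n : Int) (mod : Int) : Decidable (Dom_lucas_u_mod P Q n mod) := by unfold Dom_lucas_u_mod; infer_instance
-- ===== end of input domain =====

-- B replaces A's 2x2-matrix binary exponentiation by fast doubling on the pair (U_k, U_{k+1});
-- alternative decomposition, similar asymptotic cost, fewer multiplications per step.

-- ===== PORT A =====
-- the while-loop of A: state = matrix M (a b; c d), accumulator r, remaining exponent e
def lucasALoop (mod a b c d r00 r01 r10 r11 : Int) (e : Nat) : Int × Int × Int × Int :=
  if e = 0 then (r00, r01, r10, r11)
  else
    let s00 := if e % 2 = 1 then PySem.Int.mod (r00 * a + r01 * c) mod else r00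
    let s01 := if e % 2 = 1 then PySem.Int.mod (r00 * b + r01 * d) mod else r01
    let s10 := if e % 2 = 1 then PySem.Int.mod (r10 * a + r11 * c) mod else r10
    let s11 := if e % 2 = 1 then PySem.Int.mod (r10 * b + r11 * d) mod else r11
    lucasALoop mod (PySem.Int.mod (a * a + b * c) mod) (PySem.Int.mod (a * b + b * d) mod)
      (PySem.Int.mod (c * a + d * c) mod) (PySem.Int.mod (c * b + d * d) mod)
      s00 s01 s10 s11 (e / 2)
termination_by e
decreasing_by exact Nat.div_lt_self (Nat.pos_of_ne_zero (by omega)) (by norm_num)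

def lucas_u_mod (P : Int) (Q : Int) (n : Int) (mod : Int) : Int :=
  if n = 0 then PySem.Int.mod 0 mod
  else if n = 1 then PySem.Int.mod 1 mod
  else
    let a := PySem.Int.mod P mod
    let b := PySem.Int.mod (-Q) mod
    let c := PySem.Int.mod 1 mod
    let d := (0 : Int)
    -- e = n - 1 (n ≥ 2 under Pre_, so toNat is exact)
    let r := lucasALoop mod a b c d 1 0 0 1 (n - 1).toNat
    PySem.Int.mod r.1 mod

-- ===== PORT B =====
-- fd k = (U_k % mod, U_{k+1} % mod), recursing on k >> 1
def lucasFD (P Q mod : Int) (k : Nat) : Int × Int :=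
  if k = 0 then (PySem.Int.mod 0 mod, PySem.Int.mod 1 mod)
  else
    let p := lucasFD P Q mod (k / 2)
    let u := p.1
    let v := p.2
    let u2 := PySem.Int.mod (u * (2 * v - P * u)) mod
    let u2p1 := PySem.Int.mod (v * v - Q * u * u) mod
    if k % 2 = 1 then (u2p1, PySem.Int.mod (P * u2p1 - Q * u2) mod)
    else (u2, u2p1)
termination_by k
decreasing_by exact Nat.div_lt_self (Nat.pos_of_ne_zero (by omega)) (by norm_num)

def lucas_u_mod_alt (P : Int) (Q : Int) (n : Int) (mod : Int) : Int :=
  (lucasFD P Q mod n.toNat).1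

-- ===== PRECONDITION & SPEC =====
-- Pre_ excludes mod = 0 (A raises ZeroDivisionError) and n < 0 (A's while loop never terminates).
def Pre_lucas_u_mod (P : Int) (Q : Int) (n : Int) (mod : Int) : Prop := mod ≠ 0 ∧ 0 ≤ n
instance (P : Int) (Q : Int) (n : Int) (mod : Int) : Decidable (Pre_lucas_u_mod P Q n mod) := by unfold Pre_lucas_u_mod; infer_instance
def pvWitness_lucas_u_mod : Int × Int × Int × Int := (1, -1, 10, 7)

def Spec_lucas_u_mod (P : Int) (Q : Int) (n : Int) (mod : Int) (out : Int) : Prop := out = lucas_u_mod_alt P Q n mod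
instance (P : Int) (Q : Int) (n : Int) (mod : Int) (out : Int) : Decidable (Spec_lucas_u_mod P Q n mod out) := by unfold Spec_lucas_u_mod; infer_instance

-- ===== CLAIM (what is proved, stated in full; the proofs are below) =====
def Claim_equal_lucas_u_mod : Prop := ∀ (P : Int) (Q : Int) (n : Int) (mod : Int), Dom_lucas_u_mod P Q n mod → Pre_lucas_u_mod P Q n mod → Spec_lucas_u_mod P Q n mod (lucas_u_mod P Q n mod)

-- ===== LEMMAS AND PROOFS =====

-- the Lucas sequence U_k(P,Q) over the integers
def lucasU (P Q : Int) : Nat → Int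
  | 0 => 0
  | 1 => 1
  | (k + 2) => P * lucasU P Q (k + 1) - Q * lucasU P Q k

lemma lucasU_rec (P Q : Int) (k : Nat) :
    lucasU P Q (k + 2) = P * lucasU P Q (k + 1) - Q * lucasU P Q k := rfl

-- Python % depends only on the residue class
lemma pymod_modEq (m x : Int) : PySem.Int.mod x m ≡ x [ZMOD m] := by
  rw [Int.modEq_iff_dvd]
  have h := PySem.Int.floordiv_mul_add_mod x m
  exact ⟨PySem.Int.floordiv x m, by rw [mul_comm]; linarith⟩

lemma pymod_congr (m x y : Int) (h : x ≡ y [ZMOD m]) :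
    PySem.Int.mod x m = PySem.Int.mod y m := by
  by_cases hm : m = 0
  · subst hm
    have hx := PySem.Int.floordiv_mul_add_mod x 0
    have hy := PySem.Int.floordiv_mul_add_mod y 0
    have hxy : x = y := by simpa [Int.ModEq] using h
    simp only [mul_zero, zero_add] at hx hy
    rw [hx, hy, hxy]
  · have hc : PySem.Int.mod x m ≡ PySem.Int.mod y m [ZMOD m] :=
      ((pymod_modEq m x).trans h).trans (pymod_modEq m y).symm
    have hd : m ∣ PySem.Int.mod y m - PySem.Int.mod x m := hc.dvd
    obtain ⟨k, hk⟩ := hd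
    have hk0 : k = 0 := by
      rcases lt_trichotomy m 0 with hneg | hz | hpos
      · obtain ⟨bx1, bx2⟩ := PySem.Int.mod_neg_bounds x hneg
        obtain ⟨by1, by2⟩ := PySem.Int.mod_neg_bounds y hneg
        rcases lt_trichotomy k 0 with hkn | hk0 | hkp
        · have : m * k ≥ m * (-1) := by
            have := mul_le_mul_of_nonpos_left (by omega : k ≤ -1) (le_of_lt hneg)
            linarith
          nlinarith
        · exact hk0
        · have := mul_le_mul_of_nonpos_left (by omega : (1 : Int) ≤ k) (le_of_lt hneg)
          nlinarith
      · exact absurd hz hm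
      · have bx1 := PySem.Int.mod_nonneg x hpos
        have bx2 := PySem.Int.mod_lt x hpos
        have by1 := PySem.Int.mod_nonneg y hpos
        have by2 := PySem.Int.mod_lt y hpos
        rcases lt_trichotomy k 0 with hkn | hk0 | hkp
        · have := mul_le_mul_of_nonneg_left (by omega : k ≤ -1) (le_of_lt hpos)
          nlinarith
        · exact hk0
        · have := mul_le_mul_of_nonneg_left (by omega : (1 : Int) ≤ k) (le_of_lt hpos)
          nlinarith
    rw [hk0, mul_zero] at hk
    omega

-- addition formula: U_{j+k+1} = U_{j+1} U_{k+1} - Q U_j U_k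
lemma lucasU_add (P Q : Int) (j k : Nat) :
    lucasU P Q (j + k + 1) =
      lucasU P Q (j + 1) * lucasU P Q (k + 1) - Q * (lucasU P Q j * lucasU P Q k) := by
  induction k using Nat.twoStepInduction with
  | zero => simp [lucasU]
  | one =>
      simp only [lucasU]
      ring
  | more k ih1 ih2 =>
      have h4 := lucasU_rec P Q (j + k + 1)
      have h3 := lucasU_rec P Q (k + 1)
      have e1 : j + k + 1 + 2 = j + (k + 2) + 1 := by ring
      have e2 : k + 1 + 2 = k + 2 + 1 := by ring
      have e3 : j + k + 1 + 1 = j + (k + 1) + 1 := by ring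
      have e4 : k + 1 + 1 = k + 2 := rfl
      rw [e1, e3] at h4
      rw [e2, e4] at h3
      rw [e4] at ih2
      rw [h4, ih2, ih1, h3]
      have h5 := lucasU_rec P Q k
      linear_combination (Q * lucasU P Q j) * h5

lemma lucasU_double (P Q : Int) (j : Nat) :
    lucasU P Q (2 * j) = lucasU P Q j * (2 * lucasU P Q (j + 1) - P * lucasU P Q j) := by
  cases j with
  | zero => simp [lucasU]
  | succ m =>
      have hadd := lucasU_add P Q (m + 1) m
      have hr := lucasU_rec P Q m
      rw [show 2 * (m + 1) = (m + 1) + m + 1 from by ring]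
      rw [hadd, show m + 1 + 1 = m + 2 from rfl]
      linear_combination (-(lucasU P Q (m + 1))) * hr

lemma lucasU_double_succ (P Q : Int) (j : Nat) :
    lucasU P Q (2 * j + 1) =
      lucasU P Q (j + 1) * lucasU P Q (j + 1) - Q * (lucasU P Q j * lucasU P Q j) := by
  rw [show 2 * j + 1 = j + j + 1 from by ring]
  exact lucasU_add P Q j j

-- B computes (U_k mod, U_{k+1} mod)
lemma lucasFD_spec (P Q mod : Int) (k : Nat) :
    lucasFD P Q mod k =
      (PySem.Int.mod (lucasU P Q k) mod, PySem.Int.mod (lucasU P Q (k + 1)) mod) := by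
  induction k using Nat.strongRecOn with
  | ind k ih =>
    rw [lucasFD]
    by_cases hk : k = 0
    · simp only [hk, if_pos]
      rfl
    · simp only [if_neg hk]
      rw [ih (k / 2) (Nat.div_lt_self (Nat.pos_of_ne_zero hk) (by norm_num))]
      have hu := pymod_modEq mod (lucasU P Q (k / 2))
      have hv := pymod_modEq mod (lucasU P Q (k / 2 + 1))
      have hu2 : PySem.Int.mod
          (PySem.Int.mod (lucasU P Q (k / 2)) mod *
            (2 * PySem.Int.mod (lucasU P Q (k / 2 + 1)) mod -
              P * PySem.Int.mod (lucasU P Q (k / 2)) mod)) mod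
          = PySem.Int.mod (lucasU P Q (2 * (k / 2))) mod := by
        rw [lucasU_double]
        exact pymod_congr mod _ _
          (hu.mul (((Int.ModEq.refl 2).mul hv).sub ((Int.ModEq.refl P).mul hu)))
      have hu2p1 : PySem.Int.mod
          (PySem.Int.mod (lucasU P Q (k / 2 + 1)) mod * PySem.Int.mod (lucasU P Q (k / 2 + 1)) mod -
            Q * PySem.Int.mod (lucasU P Q (k / 2)) mod * PySem.Int.mod (lucasU P Q (k / 2)) mod) mod
          = PySem.Int.mod (lucasU P Q (2 * (k / 2) + 1)) mod := by
        rw [lucasU_double_succ]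
        refine pymod_congr mod _ _ ?_
        have : Q * PySem.Int.mod (lucasU P Q (k / 2)) mod * PySem.Int.mod (lucasU P Q (k / 2)) mod
            ≡ Q * (lucasU P Q (k / 2) * lucasU P Q (k / 2)) [ZMOD mod] := by
          have := ((Int.ModEq.refl Q).mul hu).mul hu
          calc Q * PySem.Int.mod (lucasU P Q (k / 2)) mod * PySem.Int.mod (lucasU P Q (k / 2)) mod
              ≡ Q * lucasU P Q (k / 2) * lucasU P Q (k / 2) [ZMOD mod] := this
            _ = Q * (lucasU P Q (k / 2) * lucasU P Q (k / 2)) := by ring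
        exact (hv.mul hv).sub this
      by_cases hp : k % 2 = 1
      · simp only [if_pos hp]
        have hkeq : 2 * (k / 2) + 1 = k := by omega
        rw [hu2p1, hu2, hkeq]
        refine Prod.ext rfl ?_
        have h1 := pymod_modEq mod (lucasU P Q k)
        have h2 := pymod_modEq mod (lucasU P Q (2 * (k / 2)))
        have hrec : lucasU P Q (k + 1) = P * lucasU P Q k - Q * lucasU P Q (2 * (k / 2)) := by
          have : k + 1 = (2 * (k / 2)) + 2 := by omega
          rw [this, lucasU_rec, show 2 * (k / 2) + 1 = k from hkeq]
        show PySem.Int.mod _ mod = PySem.Int.mod (lucasU P Q (k + 1)) mod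
        rw [hrec]
        exact pymod_congr mod _ _ (((Int.ModEq.refl P).mul h1).sub ((Int.ModEq.refl Q).mul h2))
      · simp only [if_neg hp]
        have hkeq : 2 * (k / 2) = k := by omega
        rw [hu2, hu2p1, hkeq]

-- 2×2 integer matrices, for A's loop
structure M2 where
  a : Int
  b : Int
  c : Int
  d : Int

def mmul (x y : M2) : M2 :=
  ⟨x.a * y.a + x.b * y.c, x.a * y.b + x.b * y.d,
   x.c * y.a + x.d * y.c, x.c * y.b + x.d * y.d⟩

def mpow (x : M2) : Nat → M2
  | 0 => ⟨1, 0, 0, 1⟩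
  | k + 1 => mmul (mpow x k) x

def MEq (m : Int) (x y : M2) : Prop :=
  x.a ≡ y.a [ZMOD m] ∧ x.b ≡ y.b [ZMOD m] ∧ x.c ≡ y.c [ZMOD m] ∧ x.d ≡ y.d [ZMOD m]

lemma MEq_refl (m : Int) (x : M2) : MEq m x x :=
  ⟨Int.ModEq.refl _, Int.ModEq.refl _, Int.ModEq.refl _, Int.ModEq.refl _⟩

lemma mmul_assoc (x y z : M2) : mmul (mmul x y) z = mmul x (mmul y z) := by
  simp only [mmul, M2.mk.injEq]
  refine ⟨by ring, by ring, by ring, by ring⟩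

lemma mmul_one (x : M2) : mmul x ⟨1, 0, 0, 1⟩ = x := by
  simp [mmul]

lemma one_mmul (x : M2) : mmul ⟨1, 0, 0, 1⟩ x = x := by
  simp [mmul]

lemma mpow_comm (x : M2) (k : Nat) : mmul (mpow x k) x = mmul x (mpow x k) := by
  induction k with
  | zero => rw [mpow, mmul_one, one_mmul]
  | succ k ih => rw [mpow, ih, mmul_assoc, ih]

lemma mpow_two_mul (x : M2) (k : Nat) : mpow x (2 * k) = mpow (mmul x x) k := by
  induction k with
  | zero => rfl
  | succ k ih =>
      rw [show 2 * (k + 1) = 2 * k + 1 + 1 from by ring, mpow, mpow, ih, mmul_assoc]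
      rfl

lemma lucasALoop_spec (mod : Int) (e : Nat) :
    ∀ (a b c d r00 r01 r10 r11 : Int) (M' R' : M2),
      MEq mod ⟨a, b, c, d⟩ M' → MEq mod ⟨r00, r01, r10, r11⟩ R' →
      MEq mod ⟨(lucasALoop mod a b c d r00 r01 r10 r11 e).1,
               (lucasALoop mod a b c d r00 r01 r10 r11 e).2.1,
               (lucasALoop mod a b c d r00 r01 r10 r11 e).2.2.1,
               (lucasALoop mod a b c d r00 r01 r10 r11 e).2.2.2⟩
        (mmul R' (mpow M' e)) := by
  induction e using Nat.strongRecOn with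
  | ind e ihe =>
    intro a b c d r00 r01 r10 r11 M' R' hM hR
    rw [lucasALoop]
    by_cases he : e = 0
    · simp only [he, if_pos]
      rw [mpow, mmul_one]
      exact hR
    · simp only [if_neg he]
      have hdiv := Nat.div_lt_self (Nat.pos_of_ne_zero he) (by norm_num : 1 < 2)
      have hM2 : MEq mod ⟨PySem.Int.mod (a * a + b * c) mod, PySem.Int.mod (a * b + b * d) mod,
          PySem.Int.mod (c * a + d * c) mod, PySem.Int.mod (c * b + d * d) mod⟩ (mmul M' M') := by
        obtain ⟨h1, h2, h3, h4⟩ := hM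
        exact ⟨(pymod_modEq _ _).trans ((h1.mul h1).add (h2.mul h3)),
               (pymod_modEq _ _).trans ((h1.mul h2).add (h2.mul h4)),
               (pymod_modEq _ _).trans ((h3.mul h1).add (h4.mul h3)),
               (pymod_modEq _ _).trans ((h3.mul h2).add (h4.mul h4))⟩
      by_cases hp : e % 2 = 1
      · simp only [if_pos hp]
        have hS : MEq mod ⟨PySem.Int.mod (r00 * a + r01 * c) mod, PySem.Int.mod (r00 * b + r01 * d) mod,
            PySem.Int.mod (r10 * a + r11 * c) mod, PySem.Int.mod (r10 * b + r11 * d) mod⟩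
            (mmul R' M') := by
          obtain ⟨h1, h2, h3, h4⟩ := hM
          obtain ⟨g1, g2, g3, g4⟩ := hR
          exact ⟨(pymod_modEq _ _).trans ((g1.mul h1).add (g2.mul h3)),
                 (pymod_modEq _ _).trans ((g1.mul h2).add (g2.mul h4)),
                 (pymod_modEq _ _).trans ((g3.mul h1).add (g4.mul h3)),
                 (pymod_modEq _ _).trans ((g3.mul h2).add (g4.mul h4))⟩
        have h := ihe (e / 2) hdiv _ _ _ _ _ _ _ _ (mmul M' M') (mmul R' M') hM2 hS
        have he2 : e = 2 * (e / 2) + 1 := by omega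
        have heq : mmul (mmul R' M') (mpow (mmul M' M') (e / 2)) = mmul R' (mpow M' e) := by
          conv_rhs => rw [he2, mpow, mpow_comm, ← mmul_assoc, mpow_two_mul]
        rw [← heq]
        exact h
      · simp only [if_neg hp]
        have h := ihe (e / 2) hdiv _ _ _ _ _ _ _ _ (mmul M' M') R' hM2 hR
        have he2 : e = 2 * (e / 2) := by omega
        have heq : mmul R' (mpow (mmul M' M') (e / 2)) = mmul R' (mpow M' e) := by
          conv_rhs => rw [he2, mpow_two_mul]
        rw [← heq]
        exact h

lemma mpow_M_entries (P Q : Int) (k : Nat) :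
    mpow ⟨P, -Q, 1, 0⟩ k =
      ⟨lucasU P Q (k + 1), -Q * lucasU P Q k, lucasU P Q k,
       lucasU P Q (k + 1) - P * lucasU P Q k⟩ := by
  induction k with
  | zero => simp [mpow, lucasU]
  | succ k ih =>
      have hr := lucasU_rec P Q k
      rw [mpow, ih]
      simp only [mmul, M2.mk.injEq, show k + 1 + 1 = k + 2 from rfl]
      refine ⟨by linear_combination -hr, by ring, by ring, by linear_combination -hr⟩

-- ===== VERDICT (by name: the statement is the Claim_ definition above) =====
theorem lucas_u_mod_spec : Claim_equal_lucas_u_mod := by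
  intro P Q n mod _hdom hpre
  obtain ⟨hm, hn⟩ := hpre
  unfold Spec_lucas_u_mod lucas_u_mod_alt lucas_u_mod
  rw [lucasFD_spec]
  by_cases h0 : n = 0
  · simp only [h0, if_pos]
    show PySem.Int.mod 0 mod = PySem.Int.mod (lucasU P Q (0 : Int).toNat) mod
    rfl
  · by_cases h1 : n = 1
    · simp only [h1, if_neg one_ne_zero, if_pos]
      show PySem.Int.mod 1 mod = PySem.Int.mod (lucasU P Q (1 : Int).toNat) mod
      rfl
    · simp only [if_neg h0, if_neg h1]
      have hM : MEq mod ⟨PySem.Int.mod P mod, PySem.Int.mod (-Q) mod, PySem.Int.mod 1 mod, 0⟩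
          (⟨P, -Q, 1, 0⟩ : M2) :=
        ⟨pymod_modEq mod P, pymod_modEq mod (-Q), pymod_modEq mod 1, Int.ModEq.refl 0⟩
      have h := lucasALoop_spec mod (n - 1).toNat (PySem.Int.mod P mod) (PySem.Int.mod (-Q) mod)
        (PySem.Int.mod 1 mod) 0 1 0 0 1 ⟨P, -Q, 1, 0⟩ ⟨1, 0, 0, 1⟩ hM (MEq_refl mod _)
      rw [one_mmul, mpow_M_entries] at h
      obtain ⟨ha, -, -, -⟩ := h
      have ha' : (lucasALoop mod (PySem.Int.mod P mod) (PySem.Int.mod (-Q) mod)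
          (PySem.Int.mod 1 mod) 0 1 0 0 1 (n - 1).toNat).1
          ≡ lucasU P Q ((n - 1).toNat + 1) [ZMOD mod] := ha
      have hton : (n - 1).toNat + 1 = n.toNat := by omega
      rw [hton] at ha'
      exact pymod_congr mod _ _ ha'
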